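-- pv_equiv track=rewrite | github.com/Akshay-Chandelkar/PythonTraining2019 | Ex58_CountVowelConstChar.py | CountVowelConstChar
-- ===== SOURCE A (Python) =====
-- def CountVowelConstChar(S1):
--     count_v = 0
--     count_c = 0
--     count_ch = 0
--     i = 0
--     while i < len(S1):
--         if not S1[i].isalpha():
--             count_ch += 1
--         elif S1[i] == 'a' or S1[i] == 'e' or S1[i] == 'i' or S1[i] == 'o' or S1[i] == 'u':
--             count_v += 1
--         else:
--             count_c += 1
--         i += 1
--     return count_v,count_c,count_ch
-- ===== SOURCE B (Python) =====
-- def CountVowelConstChar(S1):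
--     count_ch = sum(1 for c in S1 if not c.isalpha())
--     count_v = sum(1 for c in S1 if c in 'aeiou')
--     return count_v, len(S1) - count_ch - count_v, count_ch
-- ===== Notes on version B (the rewrite author's own statement) =====
-- stated objective: simpler
-- what changed: B replaces A's index-driven while loop with three-way branch classification by two independent filter-counts (non-alpha, lowercase vowels) and derives the consonant count by subtraction from the length.
import Mathlib
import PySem

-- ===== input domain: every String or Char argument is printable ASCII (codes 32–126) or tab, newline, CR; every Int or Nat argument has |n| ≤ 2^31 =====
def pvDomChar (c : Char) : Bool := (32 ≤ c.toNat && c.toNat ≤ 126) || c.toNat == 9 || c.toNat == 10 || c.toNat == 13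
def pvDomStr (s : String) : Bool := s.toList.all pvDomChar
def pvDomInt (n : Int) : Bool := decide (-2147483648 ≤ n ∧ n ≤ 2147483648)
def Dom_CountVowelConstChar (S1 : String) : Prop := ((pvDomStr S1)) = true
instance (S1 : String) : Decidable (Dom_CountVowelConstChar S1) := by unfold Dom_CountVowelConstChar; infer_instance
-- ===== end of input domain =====

-- B replaces A's while-loop branch classification by two filter-counts and a subtraction; objective: simpler.

-- ===== PORT A =====
-- A's while loop over indices, transcribed as recursion over the remaining characters,
-- carrying the three counters (count_v, count_c, count_ch) in A's branch order.
def pvLoopA : List Char → Int × Int × Int → Int × Int × Int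
  | [], acc => acc
  | c :: rest, (v, k, ch) =>
    if ¬ (PySem.Chars.isalpha c) then pvLoopA rest (v, k, ch + 1)
    else if c = 'a' ∨ c = 'e' ∨ c = 'i' ∨ c = 'o' ∨ c = 'u' then pvLoopA rest (v + 1, k, ch)
    else pvLoopA rest (v, k + 1, ch)

def CountVowelConstChar (S1 : String) : Int × Int × Int :=
  pvLoopA S1.toList (0, 0, 0)

-- ===== PORT B =====
def CountVowelConstChar_alt (S1 : String) : Int × Int × Int :=
  let l := S1.toList
  let count_ch : Int := l.countP (fun c => !(PySem.Chars.isalpha c))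
  let count_v : Int := l.countP (fun c => ("aeiou".toList).contains c)
  (count_v, (l.length : Int) - count_ch - count_v, count_ch)

-- ===== PRECONDITION & SPEC =====
def Spec_CountVowelConstChar (S1 : String) (out : Int × Int × Int) : Prop := out = CountVowelConstChar_alt S1
instance (S1 : String) (out : Int × Int × Int) : Decidable (Spec_CountVowelConstChar S1 out) := by unfold Spec_CountVowelConstChar; infer_instance

-- ===== CLAIM (what is proved, stated in full; the proofs are below) =====
def Claim_equal_CountVowelConstChar : Prop := ∀ (S1 : String), Dom_CountVowelConstChar S1 → Spec_CountVowelConstChar S1 (CountVowelConstChar S1)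

-- ===== LEMMAS AND PROOFS =====
theorem pvLoopA_eq (l : List Char) (v k ch : Int) :
    pvLoopA l (v, k, ch) =
      (v + l.countP (fun c => ("aeiou".toList).contains c),
       k + ((l.length : Int) - l.countP (fun c => !(PySem.Chars.isalpha c))
              - l.countP (fun c => ("aeiou".toList).contains c)),
       ch + l.countP (fun c => !(PySem.Chars.isalpha c))) := by
  induction l generalizing v k ch with
  | nil => simp [pvLoopA]
  | cons c rest ih =>
    by_cases ha : PySem.Chars.isalpha c = true
    · by_cases hv : c = 'a' ∨ c = 'e' ∨ c = 'i' ∨ c = 'o' ∨ c = 'u'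
      · have hmem : ("aeiou".toList).contains c = true := by
          rcases hv with h|h|h|h|h <;> subst h <;> decide
        simp only [pvLoopA]
        rw [if_neg (not_not.mpr ha), if_pos hv, ih]
        simp only [List.countP_cons, hmem, ha, Bool.not_true, List.length_cons,
          Prod.mk.injEq]
        refine ⟨by push_cast; omega, by push_cast; omega, by push_cast; omega⟩
      · have hmem : ("aeiou".toList).contains c = false := by
          rw [Bool.eq_false_iff]
          intro h
          apply hv
          have h2 := h
          simp at h2
          tauto
        simp only [pvLoopA]
        rw [if_neg (not_not.mpr ha), if_neg hv, ih]
        simp only [List.countP_cons, hmem, ha, Bool.not_true, List.length_cons,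
          Prod.mk.injEq]
        refine ⟨by push_cast; omega, by push_cast; omega, by push_cast; omega⟩
    · have hmem : ("aeiou".toList).contains c = false := by
        rw [Bool.eq_false_iff]
        intro h
        apply ha
        have h2 := h
        simp at h2
        have : c = 'a' ∨ c = 'e' ∨ c = 'i' ∨ c = 'o' ∨ c = 'u' := by tauto
        rcases this with h3|h3|h3|h3|h3 <;> subst h3 <;> decide
      have ha' : PySem.Chars.isalpha c = false := by rwa [Bool.not_eq_true] at ha
      simp only [pvLoopA]
      rw [if_pos ha, ih]
      simp only [List.countP_cons, hmem, ha', Bool.not_false, List.length_cons,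
        Prod.mk.injEq]
      refine ⟨by push_cast; omega, by push_cast; omega, by push_cast; omega⟩

-- ===== VERDICT (by name: the statement is the Claim_ definition above) =====
theorem CountVowelConstChar_spec : Claim_equal_CountVowelConstChar := by
  intro S1 _
  unfold Spec_CountVowelConstChar CountVowelConstChar CountVowelConstChar_alt
  rw [pvLoopA_eq]
  simp
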